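-- pv_equiv track=rewrite | github.com/ksbirada/gomuku | submission.py | is_open_three
-- ===== SOURCE A (Python) =====
-- def is_open_three(sequence, player):
--     # Ensure that sequence is at least 5 in length
--     if len(sequence) < 5:
--         return False
--     # An open three would have three player's stones and two empty spots in a sequence of five
--     for i in range(len(sequence) - 4):
--         window = sequence[i:i + 5]
--         if window.count(player) == 3 and window.count(0) == 2:
--             # Ensure the empty spots are not at the ends of the sequence
--             if window[0] == 0 and window[4] == 0:
--                 continue
--             return True
--     return False
-- ===== SOURCE B (Python) =====
-- def _prefix_counts(sequence, value):
--     counts = [0]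
--     c = 0
--     for x in sequence:
--         if x == value:
--             c += 1
--         counts.append(c)
--     return counts
--
--
-- def is_open_three(sequence, player):
--     n = len(sequence)
--     if n < 5:
--         return False
--     pp = _prefix_counts(sequence, player)
--     pz = _prefix_counts(sequence, 0)
--     for i in range(n - 4):
--         if pp[i + 5] - pp[i] == 3 and pz[i + 5] - pz[i] == 2:
--             if not (sequence[i] == 0 and sequence[i + 4] == 0):
--                 return True
--     return False
-- ===== Notes on version B (the rewrite author's own statement) =====
-- stated objective: alternative
-- what changed: Replaces A's per-window slicing and rescanning (two .count calls per 5-element window) with two prefix-count tables built in one pass, each window test becoming table differences plus a direct end-guard read of the raw sequence.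
import Mathlib
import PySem

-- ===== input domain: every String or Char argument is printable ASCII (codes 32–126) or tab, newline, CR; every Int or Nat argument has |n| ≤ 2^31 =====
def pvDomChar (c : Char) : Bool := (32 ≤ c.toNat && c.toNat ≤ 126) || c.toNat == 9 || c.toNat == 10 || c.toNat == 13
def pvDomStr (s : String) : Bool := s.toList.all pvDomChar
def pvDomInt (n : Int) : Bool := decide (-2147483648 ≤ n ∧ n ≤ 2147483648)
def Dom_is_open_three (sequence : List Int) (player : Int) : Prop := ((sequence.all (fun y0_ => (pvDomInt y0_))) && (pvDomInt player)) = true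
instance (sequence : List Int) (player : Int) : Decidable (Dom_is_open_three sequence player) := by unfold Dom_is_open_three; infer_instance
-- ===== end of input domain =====

-- B replaces A's per-window slice-and-rescan with two prefix-count tables built in one
-- pass, each window test becoming table differences; alternative structure, same results.

-- ===== PORT A =====
-- window[0]/window[4] are always in range when read (the window has 5 elements), so pyGetD is exact
def is_open_three (sequence : List Int) (player : Int) : Bool :=
  if sequence.length < 5 then false
  else
    (PySem.List.pyRange 0 ((sequence.length : Int) - 4) 1).any (fun i =>
      let window := PySem.List.slice sequence (some i) (some (i + 5))
      if PySem.List.count window player == 3 && PySem.List.count window 0 == 2 then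
        !(PySem.List.pyGetD window 0 0 == 0 && PySem.List.pyGetD window 4 0 == 0)
      else false)

-- ===== PORT B =====
-- prefix table of counts of `value` (indices in range wherever read, so pyGetD is exact)
def prefixCounts (sequence : List Int) (value : Int) : List Int :=
  (sequence.foldl (fun (st : Int × List Int) x =>
      let c := if x == value then st.1 + 1 else st.1
      (c, st.2 ++ [c]))
    ((0 : Int), [(0 : Int)])).2

def is_open_three_alt (sequence : List Int) (player : Int) : Bool :=
  let n := sequence.length
  if n < 5 then false
  else
    let pp := prefixCounts sequence player
    let pz := prefixCounts sequence 0
    (PySem.List.pyRange 0 ((n : Int) - 4) 1).any (fun i =>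
      if (PySem.List.pyGetD pp (i + 5) 0 - PySem.List.pyGetD pp i 0 == 3) &&
         (PySem.List.pyGetD pz (i + 5) 0 - PySem.List.pyGetD pz i 0 == 2) then
        !(PySem.List.pyGetD sequence i 0 == 0 && PySem.List.pyGetD sequence (i + 4) 0 == 0)
      else false)

-- ===== PRECONDITION & SPEC =====
def Spec_is_open_three (sequence : List Int) (player : Int) (out : Bool) : Prop := out = is_open_three_alt sequence player
instance (sequence : List Int) (player : Int) (out : Bool) : Decidable (Spec_is_open_three sequence player out) := by unfold Spec_is_open_three; infer_instance

-- ===== CLAIM (what is proved, stated in full; the proofs are below) =====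
def Claim_equal_is_open_three : Prop := ∀ (sequence : List Int) (player : Int), Dom_is_open_three sequence player → Spec_is_open_three sequence player (is_open_three sequence player)

-- ===== LEMMAS AND PROOFS =====

-- the fold in prefixCounts builds the table of running counts
theorem prefixCounts_foldl (v : Int) (l : List Int) (c : Int) (acc : List Int) :
    (l.foldl (fun (st : Int × List Int) x =>
        let c := if x == v then st.1 + 1 else st.1
        (c, st.2 ++ [c])) (c, acc)).2
    = acc ++ (List.range l.length).map (fun k => c + ((l.take (k+1)).count v : Int)) := by
  induction l generalizing c acc with
  | nil => simp
  | cons x t ih =>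
    simp only [List.foldl_cons, List.length_cons, List.range_succ_eq_map,
      List.map_cons, List.map_map]
    rw [ih]
    simp only [List.append_assoc, List.singleton_append]
    congr 1
    congr 1
    · simp only [List.take_succ_cons, List.take_zero, List.count_cons]
      by_cases hx : x == v <;> simp [hx]
    · apply List.map_congr_left
      intro k _
      simp only [Function.comp, Nat.succ_eq_add_one, List.take_succ_cons, List.count_cons]
      by_cases hx : x == v
      · simp [hx]; push_cast; ring
      · simp [hx]

theorem prefixCounts_eq (seq : List Int) (v : Int) :
    prefixCounts seq v
      = (List.range (seq.length + 1)).map (fun k => (((seq.take k).count v : Nat) : Int)) := by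
  unfold prefixCounts
  rw [prefixCounts_foldl, List.range_succ_eq_map, List.map_cons, List.map_map]
  simp [Function.comp]

theorem prefixCounts_getD (seq : List Int) (v : Int) (k : Nat) (hk : k ≤ seq.length) :
    (prefixCounts seq v).getD k 0 = (((seq.take k).count v : Nat) : Int) := by
  rw [prefixCounts_eq, PySem.List.getD_map_range _ _ _ _ (by omega)]

-- ===== VERDICT (by name: the statement is the Claim_ definition above) =====
theorem is_open_three_spec : Claim_equal_is_open_three := by
  intro sequence player _
  unfold Spec_is_open_three is_open_three is_open_three_alt
  by_cases h5 : sequence.length < 5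
  · simp [h5]
  · simp only [h5, if_false]
    apply PySem.List.any_congr_mem
    intro i hi
    rw [PySem.List.mem_pyRange_one] at hi
    obtain ⟨h0, hlt⟩ := hi
    obtain ⟨k, rfl⟩ : ∃ k : Nat, i = (k : Int) := ⟨i.toNat, by omega⟩
    have hkn : k + 5 ≤ sequence.length := by omega
    have hwin : PySem.List.slice sequence (some (k : Int)) (some ((k : Int) + 5))
        = (sequence.drop k).take 5 := by
      have := PySem.List.slice_natCast_add sequence k 5
      push_cast at this ⊢
      exact this
    have htake : ∀ v : Int, (sequence.take (k + 5)).count v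
        = (sequence.take k).count v + ((sequence.drop k).take 5).count v := by
      intro v
      rw [List.take_add, List.count_append]
    simp only [hwin]
    have hcast5 : ((k : Int) + 5) = ((k + 5 : Nat) : Int) := by push_cast; ring
    rw [hcast5, PySem.List.pyGetD_natCast, PySem.List.pyGetD_natCast,
      PySem.List.pyGetD_natCast, PySem.List.pyGetD_natCast,
      prefixCounts_getD _ _ _ hkn, prefixCounts_getD _ _ _ (by omega),
      prefixCounts_getD _ _ _ hkn, prefixCounts_getD _ _ _ (by omega)]
    have hlen : ((sequence.drop k).take 5).length = 5 := by
      simp [List.length_take, List.length_drop]; omega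
    have hcond : (PySem.List.count ((sequence.drop k).take 5) player == 3 &&
          PySem.List.count ((sequence.drop k).take 5) 0 == 2)
        = ((((sequence.take (k+5)).count player : Int) - ((sequence.take k).count player : Int) == 3) &&
           (((sequence.take (k+5)).count 0 : Int) - ((sequence.take k).count 0 : Int) == 2)) := by
      simp only [PySem.List.count_eq]
      rw [Bool.eq_iff_iff]
      simp only [Bool.and_eq_true, beq_iff_eq]
      rw [htake player, htake 0]
      push_cast
      omega
    have hguard : (!(PySem.List.pyGetD ((sequence.drop k).take 5) 0 0 == 0 &&
          PySem.List.pyGetD ((sequence.drop k).take 5) 4 0 == 0))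
        = (!(PySem.List.pyGetD sequence (k : Int) 0 == 0 &&
             PySem.List.pyGetD sequence ((k : Int) + 4) 0 == 0)) := by
      have hg0 : ((sequence.drop k).take 5).getD 0 0 = sequence.getD k 0 := by
        rw [List.getD_eq_getElem _ _ (by omega), List.getD_eq_getElem _ _ (by omega)]
        simp [List.getElem_take, List.getElem_drop]
      have hg4 : ((sequence.drop k).take 5).getD 4 0 = sequence.getD (k + 4) 0 := by
        rw [List.getD_eq_getElem _ _ (by omega), List.getD_eq_getElem _ _ (by omega)]
        simp [List.getElem_take, List.getElem_drop]
      have hcast4 : ((k : Int) + 4) = ((k + 4 : Nat) : Int) := by push_cast; ring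
      rw [hcast4]
      simp only [PySem.List.pyGetD_natCast, PySem.List.pyGetD_ofNat']
      rw [hg0, hg4]
    rw [hcond, hguard]
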